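-- pv_equiv track=rewrite | github.com/VictorRoAlb/foundation-models-computational-pathology | src/evaluation/global_results_reporter.py | sorted_models
-- ===== SOURCE A (Python) =====
-- from typing import Any, Iterable
--
-- MODEL_ORDER = ["KEEP", "TITAN", "CONCH", "MUSK", "Patho-CLIP", "PRISM"]
--
-- def normalize_model_name(name: str) -> str:
--     canonical = str(name).strip().replace("_", "-").upper()
--     mapping = {
--         "KEEP": "KEEP",
--         "TITAN": "TITAN",
--         "CONCH": "CONCH",
--         "MUSK": "MUSK",
--         "PATHO-CLIP": "Patho-CLIP",
--         "PATHOCLIP": "Patho-CLIP",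
--         "PRISM": "PRISM",
--     }
--     return mapping.get(canonical, name.strip())
--
-- def sorted_models(models: Iterable[str]) -> list[str]:
--     unique = []
--     seen = set()
--     for model in models:
--         normalized = normalize_model_name(model)
--         if normalized not in seen:
--             seen.add(normalized)
--             unique.append(normalized)
--     order_index = {model: idx for idx, model in enumerate(MODEL_ORDER)}
--     return sorted(unique, key=lambda name: (order_index.get(name, len(order_index)), name))
-- ===== SOURCE B (Python) =====
-- MODEL_ORDER = ["KEEP", "TITAN", "CONCH", "MUSK", "Patho-CLIP", "PRISM"]
--
-- def normalize_model_name(name: str) -> str: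
--     canonical = str(name).strip().replace("_", "-").upper()
--     mapping = {
--         "KEEP": "KEEP",
--         "TITAN": "TITAN",
--         "CONCH": "CONCH",
--         "MUSK": "MUSK",
--         "PATHO-CLIP": "Patho-CLIP",
--         "PATHOCLIP": "Patho-CLIP",
--         "PRISM": "PRISM",
--     }
--     return mapping.get(canonical, name.strip())
--
-- def sorted_models(models):
--     order_index = {model: idx for idx, model in enumerate(MODEL_ORDER)}
--     fallback = len(order_index)
--     ordered = sorted((normalize_model_name(m) for m in models),
--                      key=lambda name: (order_index.get(name, fallback), name))
--     out = []
--     for name in ordered: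
--         if not out or out[-1] != name:
--             out.append(name)
--     return out
-- ===== Notes on version B (the rewrite author's own statement) =====
-- stated objective: alternative
-- what changed: B maps every name through normalize_model_name, sorts the whole (duplicate-keeping) list with the same (order-index, name) key, and dedupes in one linear pass over the sorted list by collapsing adjacent equal runs, instead of A's seen-set dedup followed by sorting.
import Mathlib
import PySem

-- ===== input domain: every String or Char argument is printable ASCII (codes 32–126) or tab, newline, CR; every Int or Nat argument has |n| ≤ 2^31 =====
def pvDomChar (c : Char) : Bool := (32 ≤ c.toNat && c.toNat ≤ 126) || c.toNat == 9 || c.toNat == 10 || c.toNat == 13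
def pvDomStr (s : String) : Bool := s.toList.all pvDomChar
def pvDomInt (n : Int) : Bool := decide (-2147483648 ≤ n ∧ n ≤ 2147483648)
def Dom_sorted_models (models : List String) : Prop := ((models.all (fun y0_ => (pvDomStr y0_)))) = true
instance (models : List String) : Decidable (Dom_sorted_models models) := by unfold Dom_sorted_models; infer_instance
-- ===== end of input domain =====

-- B sorts the normalized names first and collapses adjacent duplicates in one linear pass,
-- instead of A's seen-set dedup followed by sorting (objective: alternative decomposition).

-- ===== PORT A =====
def MODEL_ORDER : List String := ["KEEP", "TITAN", "CONCH", "MUSK", "Patho-CLIP", "PRISM"]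

def normalize_model_name (name : String) : String :=
  let canonical := PySem.Str.upper (PySem.Str.replace (PySem.Str.strip name) "_" "-")
  let mapping : PySem.Dict String String := PySem.Dict.ofList
    [("KEEP", "KEEP"), ("TITAN", "TITAN"), ("CONCH", "CONCH"), ("MUSK", "MUSK"),
     ("PATHO-CLIP", "Patho-CLIP"), ("PATHOCLIP", "Patho-CLIP"), ("PRISM", "PRISM")]
  PySem.Dict.getD mapping canonical (PySem.Str.strip name)

def pv_order_index : PySem.Dict String Int :=
  (PySem.List.enumerate MODEL_ORDER).foldl (fun d p => d.insert p.2 p.1) PySem.Dict.empty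

def sorted_models (models : List String) : List String :=
  let r := models.foldl
    (fun (p : List String × PySem.Set String) model =>
      let normalized := normalize_model_name model
      if !(PySem.Set.contains p.2 normalized) then
        (p.1 ++ [normalized], PySem.Set.add p.2 normalized)
      else p)
    ([], PySem.Set.empty)
  let order_index := pv_order_index
  PySem.List.sorted2 r.1
    (fun name => PySem.Dict.getD order_index name (order_index.size : Int))
    (fun name => name) false

-- ===== PORT B =====
def sorted_models_alt (models : List String) : List String :=
  let order_index := pv_order_index
  let fallback : Int := (order_index.size : Int)
  let ordered := PySem.List.sorted2 (models.map normalize_model_name)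
    (fun name => PySem.Dict.getD order_index name fallback)
    (fun name => name) false
  ordered.foldl
    (fun out name =>
      if out = [] ∨ PySem.List.pyGet? out (-1) ≠ some name then out ++ [name] else out)
    []

-- ===== PRECONDITION & SPEC =====
def Spec_sorted_models (models : List String) (out : List String) : Prop := out = sorted_models_alt models
instance (models : List String) (out : List String) : Decidable (Spec_sorted_models models out) := by unfold Spec_sorted_models; infer_instance

-- ===== CLAIM (what is proved, stated in full; the proofs are below) =====
def Claim_equal_sorted_models : Prop := ∀ (models : List String), Dom_sorted_models models → Spec_sorted_models models (sorted_models models)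

-- ===== LEMMAS AND PROOFS =====

-- the sort key of both ports, packed into one lexicographic linear order
def pvKey (name : String) : Int ×ₗ String :=
  toLex (PySem.Dict.getD pv_order_index name (pv_order_index.size : Int), name)

theorem pvKey_injective : Function.Injective pvKey := by
  intro a b h
  have := congrArg (fun p => (ofLex p).2) h
  simpa [pvKey] using this

-- sorted2 with the identity tiebreak is sorted with the lexicographic key pvKey
theorem sorted2_eq_sorted_lex (xs : List String) :
    PySem.List.sorted2 xs
        (fun name => PySem.Dict.getD pv_order_index name (pv_order_index.size : Int))
        (fun name => name) false
      = PySem.List.sorted xs pvKey false := by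
  simp only [PySem.List.sorted2, PySem.List.sorted]
  have h : (fun a b => decide (PySem.Dict.getD pv_order_index a (pv_order_index.size : Int) < PySem.Dict.getD pv_order_index b (pv_order_index.size : Int)) || (!decide (PySem.Dict.getD pv_order_index b (pv_order_index.size : Int) < PySem.Dict.getD pv_order_index a (pv_order_index.size : Int)) && decide ((a : String) < b)))
      = (fun a b : String => decide (pvKey a < pvKey b)) := by
    funext a b
    by_cases h1 : PySem.Dict.getD pv_order_index a (pv_order_index.size : Int) < PySem.Dict.getD pv_order_index b (pv_order_index.size : Int) <;>
      by_cases h2 : PySem.Dict.getD pv_order_index b (pv_order_index.size : Int) < PySem.Dict.getD pv_order_index a (pv_order_index.size : Int) <;>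
      by_cases h3 : a < b <;>
      simp [h1, h2, h3, pvKey, Prod.Lex.lt_iff] <;> omega
  rw [h]
  simp

-- A's dedup loop is foldl Set.add over the normalized names
theorem foldA_eq (L : List String) : ∀ (u : List String),
    (L.foldl
      (fun (p : List String × PySem.Set String) model =>
        if !(PySem.Set.contains p.2 (normalize_model_name model)) then
          (p.1 ++ [normalize_model_name model], PySem.Set.add p.2 (normalize_model_name model))
        else p)
      (u, u)).1
    = (L.map normalize_model_name).foldl PySem.Set.add u := by
  induction L with
  | nil => intro u; rfl
  | cons x xs ih =>
    intro u
    simp only [List.foldl_cons, List.map_cons]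
    by_cases h : normalize_model_name x ∈ u
    · have hadd : PySem.Set.add u (normalize_model_name x) = u := by
        simp [PySem.Set.add, h]
      rw [if_neg (by simp [PySem.Set.contains, h]), hadd]
      exact ih u
    · have hadd : PySem.Set.add u (normalize_model_name x) = u ++ [normalize_model_name x] := by
        simp [PySem.Set.add, h]
      rw [if_pos (by simp [PySem.Set.contains, h]), hadd]
      exact ih (u ++ [normalize_model_name x])

-- structural form of B's adjacent-collapse loop
def collapse1 (a : String) : List String → List String
  | [] => []
  | x :: xs => if x = a then collapse1 a xs else x :: collapse1 x xs

theorem foldB_eq : ∀ (S acc : List String) (a : String),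
    S.foldl
      (fun out name =>
        if out = [] ∨ PySem.List.pyGet? out (-1) ≠ some name then out ++ [name] else out)
      (acc ++ [a])
    = acc ++ a :: collapse1 a S := by
  intro S
  induction S with
  | nil => intro acc a; rfl
  | cons x xs ih =>
    intro acc a
    simp only [List.foldl_cons, collapse1]
    by_cases h : x = a
    · subst h
      rw [if_neg (by simp [PySem.List.pyGet?_neg_one_append_singleton])]
      simp [ih acc x]
    · rw [if_pos (by simp [PySem.List.pyGet?_neg_one_append_singleton, Ne.symm h])]
      have := ih (acc ++ [a]) x
      simpa [h] using this

theorem collapse1_subset : ∀ (S : List String) (a x : String), x ∈ collapse1 a S → x ∈ S := by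
  intro S
  induction S with
  | nil => intro a x h; simp [collapse1] at h
  | cons y ys ih =>
    intro a x h
    simp only [collapse1] at h
    by_cases hy : y = a
    · simp only [hy] at h
      exact List.mem_cons_of_mem _ (ih a x h)
    · simp only [if_neg hy] at h
      rcases List.mem_cons.mp h with h | h
      · simp [h]
      · exact List.mem_cons_of_mem _ (ih y x h)

theorem mem_cons_collapse1 : ∀ (S : List String) (a x : String),
    x ∈ a :: collapse1 a S ↔ x ∈ a :: S := by
  intro S
  induction S with
  | nil => intro a x; rfl
  | cons y ys ih =>
    intro a x
    simp only [collapse1]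
    by_cases hy : y = a
    · subst hy
      rw [if_pos rfl]
      constructor
      · intro h; rcases List.mem_cons.mp h with h | h
        · simp [h]
        · have := (ih y x).mp (List.mem_cons_of_mem _ h)
          rcases List.mem_cons.mp this with h' | h' <;> simp [h']
      · intro h
        rcases List.mem_cons.mp h with h | h
        · simp [h]
        · rcases List.mem_cons.mp h with h | h
          · simp [h]
          · have := (ih y x).mpr (List.mem_cons_of_mem _ h)
            rcases List.mem_cons.mp this with h' | h' <;> simp [h']
    · rw [if_neg hy]
      constructor
      · intro h
        rcases List.mem_cons.mp h with h | h
        · simp [h]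
        · have := (ih y x).mp h
          rcases List.mem_cons.mp this with h' | h' <;> simp [h']
      · intro h
        rcases List.mem_cons.mp h with h | h
        · simp [h]
        · have := (ih y x).mpr h
          rcases List.mem_cons.mp this with h' | h' <;> simp [h']

theorem pairwise_collapse1 : ∀ (S : List String) (a : String),
    (a :: S).Pairwise (fun p q => pvKey p ≤ pvKey q) →
    (a :: collapse1 a S).Pairwise (fun p q => pvKey p < pvKey q) := by
  intro S
  induction S with
  | nil => intro a _; simp [collapse1]
  | cons x xs ih =>
    intro a h
    rcases List.pairwise_cons.mp h with ⟨ha, htail⟩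
    simp only [collapse1]
    by_cases hx : x = a
    · subst hx
      rw [if_pos rfl]
      exact ih x htail
    · rw [if_neg hx]
      have hax : pvKey a < pvKey x := by
        have hle : pvKey a ≤ pvKey x := ha x (by simp)
        have hne : pvKey a ≠ pvKey x := fun he => hx (pvKey_injective he).symm
        exact lt_of_le_of_ne hle hne
      refine List.pairwise_cons.mpr ⟨?_, ih x htail⟩
      intro y hy
      rcases List.mem_cons.mp hy with h' | h'
      · simpa [h'] using hax
      · have hyxs : y ∈ xs := collapse1_subset xs x y h'
        have hxy : pvKey x ≤ pvKey y := (List.pairwise_cons.mp htail).1 y hyxs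
        exact lt_of_lt_of_le hax hxy

theorem sorted_models_eq : ∀ (models : List String),
    sorted_models models = sorted_models_alt models := by
  intro models
  unfold sorted_models sorted_models_alt
  simp only []
  have hinit : (([], PySem.Set.empty) : List String × PySem.Set String)
      = (([] : List String), ([] : List String)) := rfl
  rw [hinit, foldA_eq models [], sorted2_eq_sorted_lex, sorted2_eq_sorted_lex]
  have hofl : (models.map normalize_model_name).foldl PySem.Set.add ([] : PySem.Set String)
      = PySem.Set.ofList (models.map normalize_model_name) := rfl
  rw [hofl]
  cases hSc : PySem.List.sorted (models.map normalize_model_name) pvKey false with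
  | nil =>
    have hLnil : models.map normalize_model_name = [] :=
      (PySem.List.sorted_eq_nil_iff _ pvKey false).mp hSc
    simp [hLnil, PySem.Set.ofList, PySem.List.sorted]
  | cons x xs =>
    rw [List.foldl_cons, if_pos (Or.inl rfl), foldB_eq xs [] x, List.nil_append]
    have hpw : (x :: xs).Pairwise (fun p q => pvKey p ≤ pvKey q) := by
      rw [← hSc]; exact PySem.List.sorted_pairwise _ pvKey
    have hlt : (x :: collapse1 x xs).Pairwise (fun p q => pvKey p < pvKey q) :=
      pairwise_collapse1 xs x hpw
    have hnodup : (x :: collapse1 x xs).Nodup :=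
      hlt.imp (fun {p q} hpq => fun he => absurd (he ▸ hpq) (lt_irrefl _))
    have hmem : ∀ y, y ∈ x :: collapse1 x xs ↔ y ∈ PySem.Set.ofList (models.map normalize_model_name) := by
      intro y
      rw [mem_cons_collapse1, ← hSc, PySem.List.mem_sorted, PySem.Set.mem_ofList]
    have hperm : (x :: collapse1 x xs).Perm (PySem.Set.ofList (models.map normalize_model_name)) :=
      (List.perm_ext_iff_of_nodup hnodup (PySem.Set.nodup_ofList _)).mpr hmem
    exact PySem.List.sorted_eq_of_perm_of_pairwise_lt _ _ pvKey hperm hlt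

-- ===== VERDICT (by name: the statement is the Claim_ definition above) =====
theorem sorted_models_spec : Claim_equal_sorted_models := by
  intro models _
  unfold Spec_sorted_models
  exact sorted_models_eq models
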